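-- pv_equiv track=rewrite | github.com/damir-gavric/ScanSweep | processor.py | apply_quote_style_to_segments
-- ===== SOURCE A (Python) =====
-- QUOTE_STYLES = {
--     "english-double": ('"', '"'),
--     "english-single": ("'", "'"),
--     "serbian": ("„", "”"),
--     "german": ("„", "“"),
-- }
--
-- def apply_quote_style_to_segments(segments, quote_language):
--     opening_quote, closing_quote = QUOTE_STYLES.get(quote_language, QUOTE_STYLES["english-double"])
--     inside_quotes = False
--     normalized_segments = []
--
--     for segment in segments:
--         result = []
--         for char in segment:
--             if char == '"':
--                 result.append(closing_quote if inside_quotes else opening_quote)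
--                 inside_quotes = not inside_quotes
--             else:
--                 result.append(char)
--         normalized_segments.append("".join(result))
--
--     return normalized_segments
-- ===== SOURCE B (Python) =====
-- QUOTE_STYLES = {
--     "english-double": ('"', '"'),
--     "english-single": ("'", "'"),
--     "serbian": ("„", "”"),
--     "german": ("„", "“"),
-- }
--
-- def apply_quote_style_to_segments(segments, quote_language):
--     opening_quote, closing_quote = QUOTE_STYLES.get(quote_language, QUOTE_STYLES["english-double"])
--     # Stage 1: split every segment on '"' once.
--     chunked = [segment.split('"') for segment in segments]
--     # Stage 2: prefix-sum of quote counts gives each segment's starting parity.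
--     offsets = []
--     total = 0
--     for chunks in chunked:
--         offsets.append(total)
--         total += len(chunks) - 1
--     # Stage 3: stateless per-segment restyling using the global offset.
--     def restyle(chunks, offset):
--         parts = [chunks[0]]
--         for i, chunk in enumerate(chunks[1:]):
--             parts.append(opening_quote if (offset + i) % 2 == 0 else closing_quote)
--             parts.append(chunk)
--         return "".join(parts)
--     return [restyle(chunks, offset) for chunks, offset in zip(chunked, offsets)]
-- ===== Notes on version B (the rewrite author's own statement) =====
-- stated objective: alternative
-- what changed: Replaces A's single stateful per-character scan with three staged passes: split each segment on '"' once, compute each segment's starting quote index by a prefix sum of chunk counts, then restyle every segment statelessly (a pure map) from its offset parity.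
import Mathlib
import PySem

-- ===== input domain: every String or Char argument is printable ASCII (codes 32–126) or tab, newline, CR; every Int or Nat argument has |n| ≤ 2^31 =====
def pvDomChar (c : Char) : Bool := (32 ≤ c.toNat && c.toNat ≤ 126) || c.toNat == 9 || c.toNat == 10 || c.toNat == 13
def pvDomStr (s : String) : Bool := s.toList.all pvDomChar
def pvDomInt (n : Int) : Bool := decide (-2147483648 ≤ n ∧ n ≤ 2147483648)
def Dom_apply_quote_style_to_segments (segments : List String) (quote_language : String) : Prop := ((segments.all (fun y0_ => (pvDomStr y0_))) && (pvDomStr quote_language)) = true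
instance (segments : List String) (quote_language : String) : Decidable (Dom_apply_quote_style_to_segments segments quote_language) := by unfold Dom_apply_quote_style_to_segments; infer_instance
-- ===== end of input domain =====

-- B replaces A's single stateful per-character scan by three staged passes: split every
-- segment on '"' once, compute each segment's starting quote index by a prefix sum of
-- chunk counts, then restyle each segment statelessly from its offset (objective: alternative).

-- ===== PORT A =====
-- the module-level QUOTE_STYLES dict; each quote is a single character in Python
def pvQuoteStyles : PySem.Dict String (Char × Char) :=
  PySem.Dict.ofList
    [("english-double", ('"', '"')),
     ("english-single", ('\'', '\'')),
     ("serbian", ('„', '”')),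
     ("german", ('„', '“'))]

def apply_quote_style_to_segments (segments : List String) (quote_language : String) : List String :=
  -- QUOTE_STYLES.get(quote_language, QUOTE_STYLES["english-double"])
  let q := (PySem.Dict.get? pvQuoteStyles quote_language).getD ('"', '"')
  let st := segments.foldl (fun (st : Bool × List String) segment =>
      -- inner per-character loop: result list + inside_quotes flag
      let r := segment.toList.foldl (fun (p : List Char × Bool) ch =>
          if ch = '"' then (p.1 ++ [if p.2 then q.2 else q.1], !p.2)
          else (p.1 ++ [ch], p.2)) (([] : List Char), st.1)
      (r.2, st.2 ++ [String.ofList r.1])) (false, ([] : List String))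
  st.2

-- ===== PORT B =====
def apply_quote_style_to_segments_alt (segments : List String) (quote_language : String) : List String :=
  let q := (PySem.Dict.get? pvQuoteStyles quote_language).getD ('"', '"')
  -- stage 1: chunked = [segment.split('"') for segment in segments]
  let chunked := segments.map (fun segment => PySem.Chars.splitOn segment.toList ['"'])
  -- stage 2: offsets = running prefix sum of quote counts (len(chunks) - 1)
  let offsets := (chunked.foldl (fun (st : List Nat × Nat) chunks =>
      (st.1 ++ [st.2], st.2 + (chunks.length - 1))) (([] : List Nat), 0)).1
  -- stage 3: stateless restyling of each segment from its offset
  (chunked.zip offsets).map (fun p =>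
    String.ofList (p.1.headD [] ++ (p.1.drop 1).zipIdx.flatMap
      (fun ci => (if (p.2 + ci.2) % 2 = 0 then q.1 else q.2) :: ci.1)))

-- ===== PRECONDITION & SPEC =====
def Spec_apply_quote_style_to_segments (segments : List String) (quote_language : String) (out : List String) : Prop := out = apply_quote_style_to_segments_alt segments quote_language
instance (segments : List String) (quote_language : String) (out : List String) : Decidable (Spec_apply_quote_style_to_segments segments quote_language out) := by unfold Spec_apply_quote_style_to_segments; infer_instance

-- ===== CLAIM (what is proved, stated in full; the proofs are below) =====
def Claim_equal_apply_quote_style_to_segments : Prop := ∀ (segments : List String) (quote_language : String), Dom_apply_quote_style_to_segments segments quote_language → Spec_apply_quote_style_to_segments segments quote_language (apply_quote_style_to_segments segments quote_language)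

-- ===== LEMMAS AND PROOFS =====

-- splitting on the single character '"', as a plain structural recursion
def pvSpl : List Char → List (List Char)
  | [] => [[]]
  | c :: cs =>
    if c = '"' then [] :: pvSpl cs
    else
      match pvSpl cs with
      | h :: t => (c :: h) :: t
      | [] => [[c]]

theorem pvSpl_ne_nil (cs : List Char) : pvSpl cs ≠ [] := by
  cases cs with
  | nil => simp [pvSpl]
  | cons c cs =>
    simp only [pvSpl]
    split_ifs
    · simp
    · cases pvSpl cs <;> simp

-- Chars.splitOn.go with enough fuel computes pvSpl (head-prepended, acc-reversed)
theorem pvGo_eq (cs : List Char) : ∀ (fuel : Nat), cs.length ≤ fuel →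
    ∀ (cur : List Char) (acc : List (List Char)),
    PySem.Chars.splitOn.go ['"'] fuel cs cur acc =
      acc.reverse ++ ((cur.reverse ++ (pvSpl cs).headD []) :: (pvSpl cs).drop 1) := by
  induction cs with
  | nil =>
    intro fuel _ cur acc
    cases fuel <;> simp [PySem.Chars.splitOn.go, pvSpl]
  | cons c cs ih =>
    intro fuel hf cur acc
    cases fuel with
    | zero => simp at hf
    | succ f =>
      simp only [List.length_cons] at hf
      by_cases hc : c = '"'
      · subst hc
        have : (['"'] : List Char).isPrefixOf ('"' :: cs) = true := by
          simp [List.isPrefixOf]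
        rw [PySem.Chars.splitOn.go, if_pos this]
        simp only [List.length_singleton, List.drop_succ_cons, List.drop_zero]
        rw [ih f (by omega) [] (cur.reverse :: acc)]
        obtain ⟨h, t, ht⟩ : ∃ h t, pvSpl cs = h :: t := by
          cases hx : pvSpl cs with
          | nil => exact absurd hx (pvSpl_ne_nil cs)
          | cons h t => exact ⟨h, t, rfl⟩
        simp [pvSpl, ht]
      · have : (['"'] : List Char).isPrefixOf (c :: cs) = false := by
          simp [List.isPrefixOf]
          intro h; exact absurd h.symm hc
        rw [PySem.Chars.splitOn.go, if_neg (by simp [this])]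
        rw [ih f (by omega) (c :: cur) acc]
        obtain ⟨h, t, ht⟩ : ∃ h t, pvSpl cs = h :: t := by
          cases hx : pvSpl cs with
          | nil => exact absurd hx (pvSpl_ne_nil cs)
          | cons h t => exact ⟨h, t, rfl⟩
        simp [pvSpl, if_neg hc, ht]

theorem pvSplitOn_eq (cs : List Char) : PySem.Chars.splitOn cs ['"'] = pvSpl cs := by
  show PySem.Chars.splitOn.go ['"'] (cs.length + 1) cs [] [] = _
  rw [pvGo_eq cs (cs.length + 1) (by omega) [] []]
  obtain ⟨h, t, ht⟩ : ∃ h t, pvSpl cs = h :: t := by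
    cases hx : pvSpl cs with
    | nil => exact absurd hx (pvSpl_ne_nil cs)
    | cons h t => exact ⟨h, t, rfl⟩
  simp [ht]

-- A's inner loop as a structural recursion (q fixed)
def pvA (q : Char × Char) : List Char → Bool → List Char × Bool
  | [], ins => ([], ins)
  | c :: cs, ins =>
    if c = '"' then
      let r := pvA q cs (!ins)
      ((if ins then q.2 else q.1) :: r.1, r.2)
    else
      let r := pvA q cs ins
      (c :: r.1, r.2)

theorem pvA_foldl (q : Char × Char) (cs : List Char) :
    ∀ (acc : List Char) (ins : Bool),
    cs.foldl (fun (p : List Char × Bool) ch =>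
        if ch = '"' then (p.1 ++ [if p.2 then q.2 else q.1], !p.2)
        else (p.1 ++ [ch], p.2)) (acc, ins)
      = (acc ++ (pvA q cs ins).1, (pvA q cs ins).2) := by
  induction cs with
  | nil => intro acc ins; simp [pvA]
  | cons c cs ih =>
    intro acc ins
    by_cases hc : c = '"'
    · subst hc
      simp only [List.foldl_cons]
      rw [ih]
      simp [pvA]
    · simp only [List.foldl_cons, if_neg hc]
      rw [ih]
      simp [pvA, if_neg hc]

-- the styled quotes interleaved between chunks, indexed from cnt
def pvIl (q : Char × Char) : Nat → List (List Char) → List Char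
  | _, [] => []
  | cnt, ch :: t => (if cnt % 2 = 0 then q.1 else q.2) :: (ch ++ pvIl q (cnt + 1) t)

-- key per-segment lemma: A's character scan = chunks head + quote interleaving,
-- and the flag tracks the counter's parity
theorem pvKey (q : Char × Char) (cs : List Char) : ∀ (cnt : Nat),
    pvA q cs (decide (cnt % 2 = 1))
      = ((pvSpl cs).headD [] ++ pvIl q cnt ((pvSpl cs).drop 1),
         decide ((cnt + ((pvSpl cs).length - 1)) % 2 = 1)) := by
  induction cs with
  | nil => intro cnt; simp [pvA, pvSpl, pvIl]
  | cons c cs ih =>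
    intro cnt
    obtain ⟨h, t, ht⟩ : ∃ h t, pvSpl cs = h :: t := by
      cases hx : pvSpl cs with
      | nil => exact absurd hx (pvSpl_ne_nil cs)
      | cons h t => exact ⟨h, t, rfl⟩
    by_cases hc : c = '"'
    · subst hc
      have hpar : (!decide (cnt % 2 = 1)) = decide ((cnt + 1) % 2 = 1) := by
        by_cases h : cnt % 2 = 1
        · have h1 : (cnt + 1) % 2 = 0 := by omega
          simp [h, h1]
        · have h0 : cnt % 2 = 0 := by omega
          have h1 : (cnt + 1) % 2 = 1 := by omega
          simp [h, h1]
      have hq : (if decide (cnt % 2 = 1) = true then q.2 else q.1)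
          = (if cnt % 2 = 0 then q.1 else q.2) := by
        have h2 : cnt % 2 = 0 ↔ ¬ (cnt % 2 = 1) := by omega
        by_cases h : cnt % 2 = 1 <;> simp [h, h2]
      simp only [pvA]
      rw [hpar, ih (cnt + 1)]
      have hsp : pvSpl ('"' :: cs) = [] :: pvSpl cs := by simp [pvSpl]
      rw [hsp, ht]
      simp only [if_true, List.headD_cons, List.drop_succ_cons, List.drop_zero,
        List.length_cons, pvIl, Prod.mk.injEq]
      refine ⟨by rw [hq]; simp, ?_⟩
      simp only [decide_eq_decide]
      omega
    · simp only [pvA, if_neg hc]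
      rw [ih cnt]
      simp only [pvSpl, if_neg hc, ht]
      simp

-- the common normal form both ports reduce to: per-segment restyled strings with a
-- running quote counter
def pvBc (q : Char × Char) : List String → Nat → List String
  | [], _ => []
  | s :: t, cnt =>
    String.ofList ((pvSpl s.toList).headD [] ++ pvIl q cnt ((pvSpl s.toList).drop 1))
      :: pvBc q t (cnt + ((pvSpl s.toList).length - 1))

-- A's outer fold computes pvBc (flag = parity of the counter)
theorem pvOuterA (q : Char × Char) (segs : List String) :
    ∀ (cnt : Nat) (out : List String),
    (segs.foldl (fun (st : Bool × List String) segment =>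
        let r := segment.toList.foldl (fun (p : List Char × Bool) ch =>
            if ch = '"' then (p.1 ++ [if p.2 then q.2 else q.1], !p.2)
            else (p.1 ++ [ch], p.2)) (([] : List Char), st.1)
        (r.2, st.2 ++ [String.ofList r.1])) (decide (cnt % 2 = 1), out)).2
    = out ++ pvBc q segs cnt := by
  induction segs with
  | nil => intro cnt out; simp [pvBc]
  | cons s segs ih =>
    intro cnt out
    simp only [List.foldl_cons]
    rw [pvA_foldl q s.toList [] (decide (cnt % 2 = 1)), pvKey q s.toList cnt]
    simp only [List.nil_append]
    rw [ih]
    simp [pvBc]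

-- B's stage-2 fold produces the list of running offsets
def pvOffs : Nat → List (List (List Char)) → List Nat
  | _, [] => []
  | cnt, ch :: t => cnt :: pvOffs (cnt + (ch.length - 1)) t

theorem pvOffs_foldl (L : List (List (List Char))) :
    ∀ (cnt : Nat) (acc : List Nat),
    (L.foldl (fun (st : List Nat × Nat) chunks =>
        (st.1 ++ [st.2], st.2 + (chunks.length - 1))) (acc, cnt)).1
      = acc ++ pvOffs cnt L := by
  induction L with
  | nil => intro cnt acc; simp [pvOffs]
  | cons ch t ih =>
    intro cnt acc
    simp only [List.foldl_cons]
    rw [ih]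
    simp [pvOffs]

-- B's stage-3 flatMap over enumerated tail chunks is pvIl
theorem pvIl_zipIdx (q : Char × Char) (chunks : List (List Char)) :
    ∀ (off k : Nat),
    (chunks.zipIdx k).flatMap
        (fun ci => (if (off + ci.2) % 2 = 0 then q.1 else q.2) :: ci.1)
      = pvIl q (off + k) chunks := by
  induction chunks with
  | nil => intro off k; simp [pvIl]
  | cons ch t ih =>
    intro off k
    simp only [List.zipIdx_cons, List.flatMap_cons]
    rw [ih off (k + 1), show off + (k + 1) = (off + k) + 1 from by omega]
    simp [pvIl]

-- B's zip-and-map pass computes pvBc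
theorem pvOuterB (q : Char × Char) (segs : List String) :
    ∀ (cnt : Nat),
    ((segs.map (fun segment => PySem.Chars.splitOn segment.toList ['"'])).zip
        (pvOffs cnt (segs.map (fun segment => PySem.Chars.splitOn segment.toList ['"'])))).map
      (fun p => String.ofList (p.1.headD [] ++ (p.1.drop 1).zipIdx.flatMap
          (fun ci => (if (p.2 + ci.2) % 2 = 0 then q.1 else q.2) :: ci.1)))
      = pvBc q segs cnt := by
  induction segs with
  | nil => intro cnt; simp [pvBc]
  | cons s t ih =>
    intro cnt
    simp only [List.map_cons, pvOffs, List.zip_cons_cons, List.map_cons]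
    rw [ih]
    have hz := pvIl_zipIdx q ((PySem.Chars.splitOn s.toList ['"']).drop 1) cnt 0
    simp only [Nat.add_zero] at hz
    rw [hz]
    simp [pvBc, pvSplitOn_eq]

-- ===== VERDICT (by name: the statement is the Claim_ definition above) =====
theorem apply_quote_style_to_segments_spec : Claim_equal_apply_quote_style_to_segments := by
  intro segments quote_language _
  unfold Spec_apply_quote_style_to_segments
  unfold apply_quote_style_to_segments apply_quote_style_to_segments_alt
  simp only
  rw [pvOffs_foldl, List.nil_append, pvOuterB]
  have hA := pvOuterA ((PySem.Dict.get? pvQuoteStyles quote_language).getD ('"', '"'))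
    segments 0 []
  simpa using hA
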